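-- pv_equiv track=rewrite | github.com/Justagwas/MediaCrate | MediaCrate/mediacrate/ui/main_window.py | _plan_batch_layout_removals
-- ===== SOURCE A (Python) =====
-- def _plan_batch_layout_removals(current_ids: list[str], target_ids: list[str]) -> list[str] | None:
--     target_idx = 0
--     target_known = set(target_ids)
--     removals: list[str] = []
--     for entry_id in current_ids:
--         if target_idx < len(target_ids) and entry_id == target_ids[target_idx]:
--             target_idx += 1
--             continue
--         if entry_id in target_known:
--             return None
--         removals.append(entry_id)
--     if target_idx != len(target_ids):
--         return None
--     return removals
-- ===== SOURCE B (Python) =====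
-- def _plan_batch_layout_removals(current_ids: list[str], target_ids: list[str]) -> list[str] | None:
--     known = set(target_ids)
--     kept = [e for e in current_ids if e in known]
--     if kept != target_ids:
--         return None
--     return [e for e in current_ids if e not in known]
-- ===== Notes on version B (the rewrite author's own statement) =====
-- stated objective: simpler
-- what changed: Replaces A's fused two-pointer scan with incremental index and accumulator by two independent membership-filter passes plus one list-equality validation (kept == target_ids).
import Mathlib
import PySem

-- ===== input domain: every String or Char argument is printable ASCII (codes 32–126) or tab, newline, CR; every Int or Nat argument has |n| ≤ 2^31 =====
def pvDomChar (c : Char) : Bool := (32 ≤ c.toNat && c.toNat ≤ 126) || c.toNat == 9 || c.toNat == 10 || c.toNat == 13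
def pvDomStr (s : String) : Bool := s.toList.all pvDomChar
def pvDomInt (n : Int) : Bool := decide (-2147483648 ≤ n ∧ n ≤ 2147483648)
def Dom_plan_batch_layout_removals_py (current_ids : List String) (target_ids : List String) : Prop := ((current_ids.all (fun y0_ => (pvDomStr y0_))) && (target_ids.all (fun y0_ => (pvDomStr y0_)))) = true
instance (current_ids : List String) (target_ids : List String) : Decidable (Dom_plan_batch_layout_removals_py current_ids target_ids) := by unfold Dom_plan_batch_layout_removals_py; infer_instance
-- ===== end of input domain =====

-- B replaces A's fused two-pointer scan by two membership-filter passes plus a list-equality validation (simpler decomposition; same cost).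

-- ===== PORT A =====
-- the for-loop of A over current_ids, carrying target_idx and the removals accumulator
def planALoop (target_ids : List String) (target_known : PySem.Set String)
    (cur : List String) (target_idx : Nat) (removals : List String) : Option (List String) :=
  match cur with
  | [] => if target_idx ≠ target_ids.length then none else some removals
  | entry_id :: rest =>
    if target_idx < target_ids.length ∧ target_ids[target_idx]? = some entry_id then
      planALoop target_ids target_known rest (target_idx + 1) removals
    else if target_known.contains entry_id then none
    else planALoop target_ids target_known rest target_idx (removals ++ [entry_id])

def plan_batch_layout_removals_py (current_ids : List String) (target_ids : List String) : Option (List String) :=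
  planALoop target_ids (PySem.Set.ofList target_ids) current_ids 0 []

-- ===== PORT B =====
def plan_batch_layout_removals_py_alt (current_ids : List String) (target_ids : List String) : Option (List String) :=
  let known := PySem.Set.ofList target_ids
  let kept := current_ids.filter (fun e => known.contains e)
  if kept ≠ target_ids then none
  else some (current_ids.filter (fun e => !(known.contains e)))

-- ===== PRECONDITION & SPEC =====
def Spec_plan_batch_layout_removals_py (current_ids : List String) (target_ids : List String) (out : Option (List String)) : Prop := out = plan_batch_layout_removals_py_alt current_ids target_ids
instance (current_ids : List String) (target_ids : List String) (out : Option (List String)) : Decidable (Spec_plan_batch_layout_removals_py current_ids target_ids out) := by unfold Spec_plan_batch_layout_removals_py; infer_instance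

-- ===== CLAIM (what is proved, stated in full; the proofs are below) =====
def Claim_equal_plan_batch_layout_removals_py : Prop := ∀ (current_ids : List String) (target_ids : List String), Dom_plan_batch_layout_removals_py current_ids target_ids → Spec_plan_batch_layout_removals_py current_ids target_ids (plan_batch_layout_removals_py current_ids target_ids)

-- ===== LEMMAS AND PROOFS =====

lemma planALoop_eq (tgt : List String) (cur : List String) (idx : Nat) (acc : List String)
    (h : idx ≤ tgt.length) :
    planALoop tgt (PySem.Set.ofList tgt) cur idx acc =
      if cur.filter (fun e => (PySem.Set.ofList tgt).contains e) = tgt.drop idx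
      then some (acc ++ cur.filter (fun e => !((PySem.Set.ofList tgt).contains e)))
      else none := by
  induction cur generalizing idx acc with
  | nil =>
    simp only [planALoop, List.filter_nil]
    rcases lt_or_eq_of_le h with hlt | heq
    · have hne : tgt.drop idx ≠ [] := by
        simp [List.drop_eq_nil_iff]; omega
      simp [Nat.ne_of_lt hlt, Ne.symm hne]
    · simp [heq, List.drop_length]
  | cons e rest ih =>
    by_cases h1 : idx < tgt.length ∧ tgt[idx]? = some e
    · obtain ⟨hlt, hget⟩ := h1
      have hge : tgt[idx] = e := by
        rw [List.getElem?_eq_getElem hlt] at hget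
        exact Option.some.inj hget
      have hmem : e ∈ tgt := hge ▸ List.getElem_mem hlt
      have hdrop : tgt.drop idx = e :: tgt.drop (idx + 1) := by
        rw [List.drop_eq_getElem_cons hlt, hge]
      rw [planALoop, if_pos ⟨hlt, hget⟩, ih (idx + 1) acc hlt, hdrop]
      simp [hmem]
    · by_cases hmem : e ∈ tgt
      · -- A returns none; B's kept list disagrees with tgt at position idx
        rw [planALoop, if_neg h1]
        have hne : ∀ ys : List String, (e :: ys) ≠ tgt.drop idx := by
          intro ys
          rcases lt_or_eq_of_le h with hlt | heq
          · rw [List.drop_eq_getElem_cons hlt]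
            intro hc
            have : e = tgt[idx] := (List.cons.inj hc).1
            exact h1 ⟨hlt, by simp [List.getElem?_eq_getElem hlt, this]⟩
          · rw [heq, List.drop_length]; simp
        simp [hmem, hne _]
      · rw [planALoop, if_neg h1, if_neg (by simp [hmem]), ih idx (acc ++ [e]) h]
        simp [hmem]

-- ===== VERDICT (by name: the statement is the Claim_ definition above) =====
theorem plan_batch_layout_removals_py_spec : Claim_equal_plan_batch_layout_removals_py := by
  intro current_ids target_ids _
  unfold Spec_plan_batch_layout_removals_py plan_batch_layout_removals_py plan_batch_layout_removals_py_alt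
  rw [planALoop_eq target_ids current_ids 0 [] (Nat.zero_le _)]
  simp only [List.drop_zero, List.nil_append]
  by_cases hk : current_ids.filter (fun e => (PySem.Set.ofList target_ids).contains e) = target_ids
  · rw [if_pos hk, if_neg (not_not_intro hk)]
  · rw [if_neg hk, if_pos hk]
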